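-- pv_equiv track=rewrite | github.com/Chemiseblanc/agner | scripts/coverage_logical.py | compatible_except
-- ===== SOURCE A (Python) =====
-- def compatible_except(left: tuple[object, ...], right: tuple[object, ...],
--                       index: int) -> bool:
--   for pos, (left_value, right_value) in enumerate(zip(left, right)):
--     if pos == index:
--       if left_value is None or right_value is None or left_value == right_value:
--         return False
--       continue
--     if left_value is None or right_value is None:
--       continue
--     if left_value != right_value:
--       return False
--   return True
-- ===== SOURCE B (Python) =====
-- def compatible_except(left: tuple[object, ...], right: tuple[object, ...],
--                       index: int) -> bool:
--   n = min(len(left), len(right))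
--   conflicts = [i for i in range(n)
--                if left[i] is not None and right[i] is not None and left[i] != right[i]]
--   expected = [index] if 0 <= index < n else []
--   return conflicts == expected
-- ===== Notes on version B (the rewrite author's own statement) =====
-- stated objective: alternative
-- what changed: Instead of A's single scan with an inline pos==index three-way branch and early returns, B computes the list of conflicting positions (both sides non-None and unequal) over range(min(len(left),len(right))) and decides by comparing that list for equality with the expected conflict list ([index] if index is in range, else []).
import Mathlib
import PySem

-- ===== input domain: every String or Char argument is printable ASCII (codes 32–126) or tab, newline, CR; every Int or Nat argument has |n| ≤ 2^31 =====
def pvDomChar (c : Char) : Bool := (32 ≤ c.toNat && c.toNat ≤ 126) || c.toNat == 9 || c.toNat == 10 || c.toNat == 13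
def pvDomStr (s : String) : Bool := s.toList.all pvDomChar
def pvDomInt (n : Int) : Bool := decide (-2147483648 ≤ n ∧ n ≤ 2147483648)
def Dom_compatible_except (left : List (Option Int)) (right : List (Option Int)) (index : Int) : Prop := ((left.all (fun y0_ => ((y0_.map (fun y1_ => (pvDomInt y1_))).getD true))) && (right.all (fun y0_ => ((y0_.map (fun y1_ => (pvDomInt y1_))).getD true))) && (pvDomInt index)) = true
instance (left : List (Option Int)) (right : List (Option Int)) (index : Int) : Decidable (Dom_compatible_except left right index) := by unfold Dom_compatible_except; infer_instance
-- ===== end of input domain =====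

-- B replaces A's single scan (inline pos==index branch, early returns) by collecting the list of
-- conflicting positions and comparing it with the expected list [index] (or []); objective: alternative.

-- ===== PORT A =====
-- for pos, (lv, rv) in enumerate(zip(left, right)): ...  -- structural recursion on the zipped pairs carrying pos
def pvCompA : List ((Option Int) × (Option Int)) → Int → Int → Bool
  | [], _, _ => true
  | (lv, rv) :: rest, pos, index =>
    if pos = index then
      if lv.isNone || rv.isNone || lv == rv then false
      else pvCompA rest (pos + 1) index
    else if lv.isNone || rv.isNone then
      pvCompA rest (pos + 1) index
    else if lv != rv then false
    else pvCompA rest (pos + 1) index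

def compatible_except (left : List (Option Int)) (right : List (Option Int)) (index : Int) : Bool :=
  pvCompA (left.zip right) 0 index

-- ===== PORT B =====
-- conflicts = [i for i in range(n) if left[i] is not None and right[i] is not None and left[i] != right[i]]
def compatible_except_alt (left : List (Option Int)) (right : List (Option Int)) (index : Int) : Bool :=
  let n : Int := min (left.length : Int) (right.length : Int)
  let conflicts : List Int := (PySem.List.pyRange 0 n 1).filter (fun i =>
    match PySem.List.pyGet? left i, PySem.List.pyGet? right i with
    | some (some lv), some (some rv) => lv != rv
    | _, _ => false)
  let expected : List Int := if 0 ≤ index ∧ index < n then [index] else []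
  conflicts == expected

-- ===== PRECONDITION & SPEC =====
def Spec_compatible_except (left : List (Option Int)) (right : List (Option Int)) (index : Int) (out : Bool) : Prop := out = compatible_except_alt left right index
instance (left : List (Option Int)) (right : List (Option Int)) (index : Int) (out : Bool) : Decidable (Spec_compatible_except left right index out) := by unfold Spec_compatible_except; infer_instance

-- ===== CLAIM (what is proved, stated in full; the proofs are below) =====
def Claim_equal_compatible_except : Prop := ∀ (left : List (Option Int)) (right : List (Option Int)) (index : Int), Dom_compatible_except left right index → Spec_compatible_except left right index (compatible_except left right index)

-- ===== LEMMAS AND PROOFS =====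

-- a pair conflicts when both sides are non-None and the values differ
def pvConf (p : (Option Int) × (Option Int)) : Bool :=
  !p.1.isNone && !p.2.isNone && p.1 != p.2

-- the list of conflicting positions of the zipped pairs, counting from pos
def pvConfList (pairs : List ((Option Int) × (Option Int))) (pos : Int) : List Int :=
  ((PySem.List.enumerate pairs pos).filter (fun p => pvConf p.2)).map Prod.fst

lemma pvConfList_nil (pos : Int) : pvConfList [] pos = [] := rfl

lemma pvConfList_cons (lv rv : Option Int) (rest : List ((Option Int) × (Option Int))) (pos : Int) :
    pvConfList ((lv, rv) :: rest) pos
      = (if pvConf (lv, rv) then [pos] else []) ++ pvConfList rest (pos + 1) := by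
  simp only [pvConfList, PySem.List.enumerate_cons, List.filter_cons]
  by_cases h : pvConf (lv, rv) = true <;> simp [h]

-- every position in the conflict list of (enumerate pairs pos) is ≥ pos
lemma pvConfList_mem_ge (pairs : List ((Option Int) × (Option Int))) (pos : Int) (x : Int)
    (hx : x ∈ pvConfList pairs pos) : pos ≤ x := by
  obtain ⟨p, hp, rfl⟩ := List.mem_map.mp hx
  have hp' := List.mem_of_mem_filter hp
  obtain ⟨k, hk, rfl⟩ := (PySem.List.mem_enumerate_iff _ _ _).mp hp'
  omega

lemma pvBeq_cons_singleton (a : Int) (l : List Int) : ((a :: l) == [a]) = (l == []) := by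
  cases l <;> simp

lemma pvBeq_cons_nil (a : Int) (l : List Int) : ((a :: l) == ([] : List Int)) = false := by
  simp

lemma pvBeq_cons_singleton_ne (a b : Int) (l : List Int) (h : a ≠ b) :
    ((a :: l) == [b]) = false := by
  simp [h]

lemma pvBeq_singleton_lt (l : List Int) (pos : Int) (h : ∀ x ∈ l, pos < x) :
    (l == [pos]) = false := by
  cases l with
  | nil => simp
  | cons y ys =>
    have := h y List.mem_cons_self
    simp
    intro hy; omega

-- characterization of A's loop: it returns true iff the conflict positions are exactly the expected list
lemma pvCompA_eq (pairs : List ((Option Int) × (Option Int))) (pos index : Int) :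
    pvCompA pairs pos index =
      (pvConfList pairs pos
        == (if pos ≤ index ∧ index < pos + (pairs.length : Int) then [index] else [])) := by
  induction pairs generalizing pos with
  | nil =>
    simp only [pvCompA, pvConfList_nil, List.length_nil]
    rw [if_neg (by omega)]
    rfl
  | cons hd rest ih =>
    obtain ⟨lv, rv⟩ := hd
    rw [pvConfList_cons]
    simp only [List.length_cons, Nat.cast_add, Nat.cast_one]
    have hge := pvConfList_mem_ge rest (pos + 1)
    by_cases hconf : pvConf (lv, rv) = true
    · have hAhead : (lv.isNone || rv.isNone || lv == rv) = false := by
        simp only [pvConf] at hconf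
        cases lv <;> cases rv <;> simp_all [bne]
      rw [if_pos hconf, List.singleton_append]
      by_cases hpi : pos = index
      · subst hpi
        have hA : pvCompA ((lv, rv) :: rest) pos pos = pvCompA rest (pos + 1) pos := by
          simp [pvCompA, hAhead]
        rw [hA, ih,
          if_neg (show ¬(pos + 1 ≤ pos ∧ pos < pos + 1 + (rest.length : Int)) by omega),
          if_pos (show pos ≤ pos ∧ pos < pos + ((rest.length : Int) + 1) by omega),
          pvBeq_cons_singleton]
      · have hA : pvCompA ((lv, rv) :: rest) pos index = false := by
          simp only [pvConf] at hconf
          cases lv <;> cases rv <;> simp_all [pvCompA, bne]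
        rw [hA]
        by_cases hc : pos ≤ index ∧ index < pos + ((rest.length : Int) + 1)
        · rw [if_pos hc]
          exact (pvBeq_cons_singleton_ne pos index (pvConfList rest (pos + 1)) hpi).symm
        · rw [if_neg hc]
          exact (pvBeq_cons_nil pos (pvConfList rest (pos + 1))).symm
    · rw [if_neg hconf, List.nil_append]
      have hA : (pos ≠ index ∧ pvCompA ((lv, rv) :: rest) pos index = pvCompA rest (pos + 1) index) ∨
          (pos = index ∧ pvCompA ((lv, rv) :: rest) pos index = false) := by
        simp only [pvConf] at hconf
        by_cases hpi : pos = index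
        · subst hpi
          right
          refine ⟨rfl, ?_⟩
          cases lv <;> cases rv <;> simp_all [pvCompA, bne]
        · left
          refine ⟨hpi, ?_⟩
          cases lv <;> cases rv <;> simp_all [pvCompA, bne]
      rcases hA with ⟨hpi, hA⟩ | ⟨hpi, hA⟩
      · rw [hA, ih]
        by_cases hc : pos + 1 ≤ index ∧ index < pos + 1 + (rest.length : Int)
        · rw [if_pos hc,
            if_pos (show pos ≤ index ∧ index < pos + ((rest.length : Int) + 1) by omega)]
        · rw [if_neg hc,
            if_neg (show ¬(pos ≤ index ∧ index < pos + ((rest.length : Int) + 1)) by omega)]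
      · subst hpi
        rw [hA, if_pos (by omega)]
        exact (pvBeq_singleton_lt (pvConfList rest (pos + 1)) pos
          (fun x hx => by have := hge x hx; omega)).symm

-- B's conflict list (range + indexing into left/right) equals the conflict list of the zip
lemma pvConflicts_bridge (left right : List (Option Int)) :
    ((PySem.List.pyRange 0 (((left.zip right).length : Int)) 1).filter (fun i =>
      match PySem.List.pyGet? left i, PySem.List.pyGet? right i with
      | some (some lv), some (some rv) => lv != rv
      | _, _ => false))
    = pvConfList (left.zip right) 0 := by
  unfold pvConfList
  rw [PySem.List.enumerate_eq_map_pyRange (d := ((none : Option Int), (none : Option Int)))]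
  rw [PySem.List.len_eq]
  rw [List.filter_map, List.map_map]
  rw [show (Prod.fst ∘ (fun j => (j, PySem.List.pyGetD (left.zip right) j (none, none)))) = id from rfl,
      List.map_id]
  apply List.filter_congr
  intro i hi
  have hmem := PySem.List.mem_pyRange_one.mp hi
  have h0 : 0 ≤ i := hmem.1
  have hlt : i.toNat < (left.zip right).length := by
    have := hmem.2; omega
  have hlz : (left.zip right).length = min left.length right.length := List.length_zip
  have hltl : i.toNat < left.length := by omega
  have hltr : i.toNat < right.length := by omega
  have hd : PySem.List.pyGetD (left.zip right) i (none, none)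
      = (left[i.toNat], right[i.toNat]) := by
    rw [PySem.List.pyGetD_of_nonneg _ _ h0, List.getD_eq_getElem?_getD,
        List.getElem?_eq_getElem hlt]
    simp [List.getElem_zip]
  rw [PySem.List.pyGet?_of_nonneg left h0, PySem.List.pyGet?_of_nonneg right h0,
      List.getElem?_eq_getElem hltl, List.getElem?_eq_getElem hltr]
  simp only [Function.comp_apply, hd]
  cases left[i.toNat] <;> cases right[i.toNat] <;> simp [pvConf, bne]

-- ===== VERDICT (by name: the statement is the Claim_ definition above) =====
theorem compatible_except_spec : Claim_equal_compatible_except := by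
  intro left right index _
  unfold Spec_compatible_except compatible_except compatible_except_alt
  have hn : min ((left.length : Int)) ((right.length : Int)) = (((left.zip right).length : Int)) := by
    rw [List.length_zip]; push_cast; omega
  simp only [hn]
  rw [pvCompA_eq, pvConflicts_bridge]
  simp only [zero_add]
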